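-- pv_equiv track=rewrite | github.com/Purefekt/leetcode | 2028. Find Missing Observations/greedy.py | missingRolls
-- ===== SOURCE A (Python) =====
-- from typing import List
--
-- def missingRolls(rolls: List[int], mean: int, n: int) -> List[int]:
--
--     # get sum of n
--     total_rolls = len(rolls) + n
--     total_sum = total_rolls * mean
--     total_n = total_sum - sum(rolls)
--
--     if total_n/n > 6 or total_n < n or (total_n//n) != total_n//n:
--         return []
--
--     res = [0] * n
--     idx = 0
--     for _ in range(total_n):
--         res[idx] += 1
--         idx += 1
--         idx %= n
--
--     return res
-- ===== SOURCE B (Python) =====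
-- def missingRolls(rolls, mean, n):
--     total = (len(rolls) + n) * mean - sum(rolls)
--     if not (n <= total <= 6 * n):
--         return []
--     q, r = divmod(total, n)
--     return [q + 1] * r + [q] * (n - r)
-- ===== Notes on version B (the rewrite author's own statement) =====
-- stated objective: simpler
-- what changed: Replaces the round-robin loop that performs one increment per missing pip (total_n iterations over a mutable array with a cycling index) with a closed-form quotient/remainder construction: the first total%n slots get total//n+1, the rest get total//n.
import Mathlib
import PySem

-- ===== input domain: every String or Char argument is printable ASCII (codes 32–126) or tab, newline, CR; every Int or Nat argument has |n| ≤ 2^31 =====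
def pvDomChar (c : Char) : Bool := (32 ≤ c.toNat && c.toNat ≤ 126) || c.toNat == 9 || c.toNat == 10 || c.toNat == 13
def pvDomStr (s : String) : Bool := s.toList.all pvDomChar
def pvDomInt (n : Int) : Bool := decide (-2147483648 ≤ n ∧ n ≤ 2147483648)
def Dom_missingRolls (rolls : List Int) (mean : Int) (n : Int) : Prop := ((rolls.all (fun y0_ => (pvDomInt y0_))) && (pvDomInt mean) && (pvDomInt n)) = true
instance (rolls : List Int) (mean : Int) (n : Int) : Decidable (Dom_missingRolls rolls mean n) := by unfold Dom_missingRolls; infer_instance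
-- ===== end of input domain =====

-- B replaces A's one-increment-per-pip round-robin loop with a closed-form
-- quotient/remainder construction; return values proved equal for n ≥ 1.

-- ===== PORT A =====
-- one iteration of A's 'for _ in range(total_n)' body: res[idx] += 1; idx += 1; idx %= n
def missingRollsStep (n : Int) (st : List Int × Int) : List Int × Int :=
  (st.1.modify st.2.toNat (· + 1), PySem.Int.mod (st.2 + 1) n)

def missingRollsLoop (n : Int) : Nat → List Int × Int → List Int × Int
  | 0, st => st
  | k + 1, st => missingRollsLoop n k (missingRollsStep n st)

def missingRolls (rolls : List Int) (mean : Int) (n : Int) : List Int :=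
  let total_rolls : Int := rolls.length + n
  let total_sum : Int := total_rolls * mean
  let total_n : Int := total_sum - rolls.sum
  -- Python's float test 'total_n/n > 6' is exactly 'total_n > 6*n' for 1 ≤ n ≤ 2^31 (Pre_ ∩ Dom):
  -- the exact rational total_n/n differs from 6 by ≥ 1/n ≥ 2^-31, far above half an ulp at 6,
  -- so the correctly rounded float compares to 6 the same way the rational does.
  -- '(total_n//n) != total_n//n' is ported literally (it is identically false).
  if total_n > 6 * n ∨ total_n < n ∨
     PySem.Int.floordiv total_n n ≠ PySem.Int.floordiv total_n n then []
  else
    -- res = [0]*n; idx = 0; the loop runs range(total_n) times (total_n ≥ n ≥ 1 here)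
    (missingRollsLoop n total_n.toNat (List.replicate n.toNat 0, 0)).1

-- ===== PORT B =====
def missingRolls_alt (rolls : List Int) (mean : Int) (n : Int) : List Int :=
  let total : Int := ((rolls.length : Int) + n) * mean - rolls.sum
  if n ≤ total ∧ total ≤ 6 * n then
    let q : Int := PySem.Int.floordiv total n
    let r : Int := PySem.Int.mod total n
    List.replicate r.toNat (q + 1) ++ List.replicate (n - r).toNat q
  else []

-- ===== PRECONDITION & SPEC =====
-- Pre_ excludes exactly the inputs where A raises: n = 0 (ZeroDivisionError in 'total_n/n')
-- and n < 0 with a positive required total (IndexError on 'res[idx]' since res = [0]*n = []).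
def Pre_missingRolls (rolls : List Int) (mean : Int) (n : Int) : Prop :=
  1 ≤ n ∨ (n < 0 ∧ ((rolls.length : Int) + n) * mean - rolls.sum ≤ 0)
instance (rolls : List Int) (mean : Int) (n : Int) : Decidable (Pre_missingRolls rolls mean n) := by unfold Pre_missingRolls; infer_instance
def pvWitness_missingRolls : List Int × Int × Int := ([3, 2, 4, 3], 4, 2)

def Spec_missingRolls (rolls : List Int) (mean : Int) (n : Int) (out : List Int) : Prop := out = missingRolls_alt rolls mean n
instance (rolls : List Int) (mean : Int) (n : Int) (out : List Int) : Decidable (Spec_missingRolls rolls mean n out) := by unfold Spec_missingRolls; infer_instance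

-- ===== CLAIM (what is proved, stated in full; the proofs are below) =====
def Claim_equal_missingRolls : Prop := ∀ (rolls : List Int) (mean : Int) (n : Int), Dom_missingRolls rolls mean n → Pre_missingRolls rolls mean n → Spec_missingRolls rolls mean n (missingRolls rolls mean n)

-- ===== LEMMAS AND PROOFS =====

-- running a+b iterations = a iterations, then b
theorem missingRollsLoop_add (n : Int) (a b : Nat) (st : List Int × Int) :
    missingRollsLoop n (a + b) st = missingRollsLoop n b (missingRollsLoop n a st) := by
  induction a generalizing st with
  | zero => simp [missingRollsLoop]
  | succ a ih =>
      have : a + 1 + b = (a + b) + 1 := by omega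
      rw [this]
      simp only [missingRollsLoop, ih]

-- modifying at the junction of an append
theorem modify_append_cons (done rest : List Int) (x : Int) (f : Int → Int) :
    (done ++ x :: rest).modify done.length f = done ++ f x :: rest := by
  induction done with
  | nil => simp [List.modify]
  | cons d ds ih => simpa [List.modify] using ih

-- r steps without wrap-around: increments the next r entries, idx advances (mod n at the end)
theorem missingRollsLoop_partial (n : Int) (hn : 1 ≤ n) :
    ∀ (r : Nat) (done rest : List Int),
      done.length + rest.length = n.toNat →
      r ≤ rest.length →
      done.length < n.toNat →
      missingRollsLoop n r (done ++ rest, (done.length : Int)) =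
        (done ++ (rest.take r).map (· + 1) ++ rest.drop r,
         if done.length + r = n.toNat then 0 else ((done.length : Int) + r)) := by
  intro r
  induction r with
  | zero =>
      intro done rest h1 h2 h3
      rw [if_neg (by omega)]
      simp [missingRollsLoop]
  | succ r ih =>
      intro done rest h1 h2 h3
      cases rest with
      | nil => simp at h2
      | cons x rest' =>
        simp only [missingRollsLoop, missingRollsStep]
        have hmod : PySem.Int.mod ((done.length : Int) + 1) n = ((done.length : Int) + 1) % n :=
          PySem.Int.mod_eq_emod_of_pos (by omega)
        have htoNat : ((done.length : Int)).toNat = done.length := by omega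
        rw [htoNat, modify_append_cons, hmod]
        simp only [List.length_cons] at h1 h2
        by_cases hfull : done.length + 1 = n.toNat
        · -- wrap: this was the last slot; rest' = [] and r = 0
          have hrest' : rest' = [] := List.length_eq_zero_iff.mp (by omega)
          have hr0 : r = 0 := by subst hrest'; simp at h2; omega
          have hz : ((done.length : Int) + 1) % n = 0 := by
            have : (done.length : Int) + 1 = n := by omega
            simp [this]
          subst hr0
          rw [hz, if_pos (by omega)]
          simp [missingRollsLoop, hrest']
        · -- no wrap: recurse with done ++ [x+1]
          have hidx : ((done.length : Int) + 1) % n = (done.length : Int) + 1 :=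
            Int.emod_eq_of_lt (by omega) (by omega)
          rw [hidx]
          have ih' := ih (done ++ [x + 1]) rest'
            (by simp; omega) (by omega) (by simp; omega)
          have hcast : ((done ++ [x + 1]).length : Int) = (done.length : Int) + 1 := by
            simp
          rw [hcast, show done ++ [x + 1] ++ rest' = done ++ (x + 1) :: rest' by simp] at ih'
          rw [ih']
          simp only [Prod.mk.injEq, List.take_succ_cons, List.map_cons, List.drop_succ_cons]
          refine ⟨by simp, ?_⟩
          by_cases hend : done.length + (r + 1) = n.toNat
          · rw [if_pos (by simp; omega), if_pos hend]
          · rw [if_neg (by simp; omega), if_neg hend]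
            push_cast
            ring

-- a full round increments every entry and returns idx to 0
theorem missingRollsLoop_round (n : Int) (hn : 1 ≤ n) (res : List Int)
    (hlen : res.length = n.toNat) :
    missingRollsLoop n n.toNat (res, 0) = (res.map (· + 1), 0) := by
  have h := missingRollsLoop_partial n hn n.toNat [] res (by simpa using hlen) (by omega) (by simp; omega)
  simp only [List.nil_append, List.length_nil, Nat.cast_zero, zero_add] at h
  rw [h]
  simp [List.take_of_length_le, List.drop_eq_nil_of_le, hlen]

-- q full rounds from all-zero: every entry becomes q
theorem missingRollsLoop_rounds (n : Int) (hn : 1 ≤ n) (q : Nat) :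
    missingRollsLoop n (q * n.toNat) (List.replicate n.toNat (0 : Int), 0) =
      (List.replicate n.toNat (q : Int), 0) := by
  induction q with
  | zero => simp [missingRollsLoop]
  | succ q ih =>
      have : (q + 1) * n.toNat = q * n.toNat + n.toNat := by ring
      rw [this, missingRollsLoop_add, ih,
        missingRollsLoop_round n hn _ (by simp)]
      simp [List.map_replicate]

-- ===== VERDICT (by name: the statement is the Claim_ definition above) =====
theorem missingRolls_spec : Claim_equal_missingRolls := by
  intro rolls mean n _ hpre
  unfold Spec_missingRolls missingRolls missingRolls_alt
  simp only []
  set T : Int := ((rolls.length : Int) + n) * mean - rolls.sum with hT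
  rcases hpre with hn | ⟨hneg, htot⟩
  case inr =>
    -- n < 0 and the required total is ≤ 0: A's guard fires (T < n, or n ≤ T ≤ 0 > 6n), B's band is empty
    rw [if_pos, if_neg (by omega)]
    rcases (by omega : T < n ∨ T > 6 * n) with h | h
    · exact Or.inr (Or.inl h)
    · exact Or.inl h
  by_cases hc : n ≤ T ∧ T ≤ 6 * n
  · -- inside the feasible band: A's guard is false, the loop result equals B's closed form
    rw [if_neg (by push Not; exact ⟨by omega, by omega, rfl⟩), if_pos hc]
    have hTpos : 0 ≤ T := by omega
    set q : Int := PySem.Int.floordiv T n with hq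
    set r : Int := PySem.Int.mod T n with hr
    have hqe : q = T / n := by rw [hq]; exact PySem.Int.floordiv_eq_ediv_of_pos (by omega)
    have hre : r = T % n := by rw [hr]; exact PySem.Int.mod_eq_emod_of_pos (by omega)
    have hr0 : 0 ≤ r := by rw [hre]; exact Int.emod_nonneg T (by omega)
    have hrn : r < n := by rw [hre]; exact Int.emod_lt_of_pos T (by omega)
    have hq0 : 0 ≤ q := by rw [hqe]; exact Int.ediv_nonneg hTpos (by omega)
    have hdecomp : q * n + r = T := by
      rw [hqe, hre]
      have := Int.emod_add_ediv T n
      linarith [mul_comm n (T / n)]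
    have hsplit : T.toNat = q.toNat * n.toNat + r.toNat := by
      have : ((q.toNat * n.toNat + r.toNat : Nat) : Int) = (T.toNat : Int) := by
        push_cast
        rw [Int.toNat_of_nonneg hq0, Int.toNat_of_nonneg (by omega),
          Int.toNat_of_nonneg hr0, Int.toNat_of_nonneg hTpos]
        exact hdecomp
      exact_mod_cast this.symm
    rw [hsplit, missingRollsLoop_add, missingRollsLoop_rounds n hn q.toNat]
    have hpart := missingRollsLoop_partial n hn r.toNat []
      (List.replicate n.toNat ((q.toNat : Int)))
      (by simp) (by simp; omega) (by simp; omega)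
    simp only [List.nil_append, List.length_nil, Nat.cast_zero] at hpart
    rw [hpart]
    have hqq : ((q.toNat : Int)) = q := Int.toNat_of_nonneg hq0
    simp only [List.take_replicate, List.drop_replicate, List.map_replicate, hqq]
    have hmin : min r.toNat n.toNat = r.toNat := by omega
    have hnr : (n - r).toNat = n.toNat - r.toNat := by omega
    rw [hmin, hnr]
  · -- outside the band: A returns [] through its guard, B through its else branch
    rw [if_neg hc, if_pos]
    rcases (by omega : T < n ∨ T > 6 * n) with h | h
    · exact Or.inr (Or.inl h)
    · exact Or.inl h
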